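-- pv_equiv track=rewrite | github.com/birdears/birdears | tests/test_keyboard_indices.py | parse_intervals
-- ===== SOURCE A (Python) =====
-- def parse_intervals(key_string):
--     """Parses a keyboard string into a list of semitone intervals."""
--     intervals = []
--     accum = 0
--     # Skip the first key, start checking intervals from there
--     # But strings start with a key.
--     # We need to iterate from the second character?
--     # No, iterate all chars, track state.
--
--     # We assume valid string starts with a key
--     if not key_string:
--         return []
--
--     # Check first char is not space
--     if key_string[0] == ' ':
--         raise ValueError("String starts with space")
--
--     # Start loop from second char
--     # We need to track if we are 'inside' a key sequence
--
--     last_was_space = False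
--
--     # Actually, simplistic parser:
--     # Key -> Key : 1 semitone
--     # Key -> Space -> Key : 2 semitones
--     # Key -> Space -> Space -> Key : 3 semitones (unlikely but possible)
--
--     # We just need to count steps between keys.
--     # We can filter out spaces and count indices? No.
--     # We can iterate and count.
--
--     current_interval = 1
--     # Logic:
--     # When we see a key, we record the interval from the PREVIOUS key.
--     # But we need to handle the first key.
--
--     keys_chars = []
--
--     # Sanitize string to list of tokens?
--     # "z x" -> z, space, x
--
--     # Let's iterate index 1 to len
--
--     extracted_intervals = []
--
--     # Check if first char is key
--     if key_string[0] == ' ':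
--         return []
--
--     space_count = 0
--
--     for char in key_string[1:]:
--         if char == ' ':
--             space_count += 1
--         else:
--             # It is a key
--             interval = 1 + space_count
--             extracted_intervals.append(interval)
--             space_count = 0
--
--     return extracted_intervals
-- ===== SOURCE B (Python) =====
-- def parse_intervals(key_string):
--     """Parses a keyboard string into a list of semitone intervals."""
--     if not key_string:
--         return []
--     if key_string[0] == ' ':
--         raise ValueError("String starts with space")
--     positions = [i for i, c in enumerate(key_string) if c != ' ']
--     return [b - a for a, b in zip(positions, positions[1:])]
-- ===== Notes on version B (the rewrite author's own statement) =====
-- stated objective: simpler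
-- what changed: Replaces the stateful space-counting accumulator loop with collecting the indices of key characters and returning their consecutive differences (zip of positions with its tail).
import Mathlib
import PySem

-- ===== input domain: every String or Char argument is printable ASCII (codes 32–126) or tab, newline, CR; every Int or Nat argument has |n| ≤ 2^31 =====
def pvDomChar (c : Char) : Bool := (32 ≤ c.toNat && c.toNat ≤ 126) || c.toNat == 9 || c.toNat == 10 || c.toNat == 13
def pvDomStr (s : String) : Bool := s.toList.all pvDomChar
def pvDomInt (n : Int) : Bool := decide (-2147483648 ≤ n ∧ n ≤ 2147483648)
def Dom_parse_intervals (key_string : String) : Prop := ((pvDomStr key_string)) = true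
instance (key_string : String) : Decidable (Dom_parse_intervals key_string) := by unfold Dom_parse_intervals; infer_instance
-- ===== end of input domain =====

-- B replaces A's stateful space-counting accumulator loop with key positions + consecutive
-- differences (objective: simpler). Leading-space inputs (ValueError in both) are outside Pre_.


-- ===== PORT A =====
-- A: after the two guards, fold over key_string[1:] carrying (extracted_intervals, space_count).
def parse_intervals (key_string : String) : List Int :=
  match key_string.toList with
  | [] => []
  | c0 :: rest =>
    if c0 = ' ' then []   -- Python raises ValueError here; excluded by Pre_
    else
      (rest.foldl
        (fun (st : List Int × Int) ch =>
          if ch = ' ' then (st.1, st.2 + 1) else (st.1 ++ [1 + st.2], 0))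
        ([], 0)).1

-- ===== PORT B =====
-- B-side helper: the comprehension [i for i, c in enumerate(s) if c != ' '], index starting at n
def pvPositions : List Char → Nat → List Int
  | [], _ => []
  | c :: cs, n => if c ≠ ' ' then (n : Int) :: pvPositions cs (n + 1) else pvPositions cs (n + 1)

def parse_intervals_alt (key_string : String) : List Int :=
  match key_string.toList with
  | [] => []
  | c0 :: _ =>
    if c0 = ' ' then []   -- Python raises ValueError here; excluded by Pre_
    else
      let positions := pvPositions key_string.toList 0
      List.zipWith (fun a b => b - a) positions (positions.drop 1)

-- ===== PRECONDITION & SPEC =====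
-- Pre_ excludes exactly the inputs with a leading space, where both Pythons raise ValueError.
def Pre_parse_intervals (key_string : String) : Prop := key_string.toList.head? ≠ some ' '
instance (key_string : String) : Decidable (Pre_parse_intervals key_string) := by
  unfold Pre_parse_intervals; infer_instance
def pvWitness_parse_intervals : String := "z x"
def Spec_parse_intervals (key_string : String) (out : List Int) : Prop := out = parse_intervals_alt key_string
instance (key_string : String) (out : List Int) : Decidable (Spec_parse_intervals key_string out) := by unfold Spec_parse_intervals; infer_instance

-- ===== CLAIM (what is proved, stated in full; the proofs are below) =====
def Claim_equal_parse_intervals : Prop := ∀ (key_string : String), Dom_parse_intervals key_string → Pre_parse_intervals key_string → Spec_parse_intervals key_string (parse_intervals key_string)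

-- ===== LEMMAS AND PROOFS =====

-- A's loop, written as structural recursion on the remaining characters
def pvRun : Int → List Char → List Int
  | _, [] => []
  | k, c :: cs => if c = ' ' then pvRun (k + 1) cs else (1 + k) :: pvRun 0 cs

theorem pvFoldA (cs : List Char) : ∀ (acc : List Int) (k : Int),
    (cs.foldl
      (fun (st : List Int × Int) ch =>
        if ch = ' ' then (st.1, st.2 + 1) else (st.1 ++ [1 + st.2], 0))
      (acc, k)).1 = acc ++ pvRun k cs := by
  induction cs with
  | nil => intro acc k; simp [pvRun]
  | cons c cs ih =>
    intro acc k
    by_cases h : c = ' ' <;> simp [List.foldl, h, pvRun, ih]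

theorem pvDiffs (cs : List Char) : ∀ (p k i : Nat), i = p + 1 + k →
    List.zipWith (fun a b => b - a) ((p : Int) :: pvPositions cs i) (pvPositions cs i)
      = pvRun (k : Int) cs := by
  induction cs with
  | nil => intro p k i _; simp [pvPositions, pvRun]
  | cons c cs ih =>
    intro p k i hi
    by_cases h : c = ' '
    · have hrec := ih p (k + 1) (i + 1) (by omega)
      rw [show ((k + 1 : Nat) : Int) = (k : Int) + 1 by push_cast; ring] at hrec
      simpa [pvPositions, pvRun, h] using hrec
    · have hrec := ih i 0 (i + 1) (by omega)
      simp only [Nat.cast_zero] at hrec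
      simp only [pvPositions, pvRun, h, ne_eq, not_false_iff, if_pos, if_neg, List.zipWith]
      rw [hrec]
      congr 1
      subst hi
      push_cast
      ring

theorem parse_intervals_eq (key_string : String) (h : Pre_parse_intervals key_string) :
    parse_intervals key_string = parse_intervals_alt key_string := by
  unfold parse_intervals parse_intervals_alt
  cases hts : key_string.toList with
  | nil => rfl
  | cons c0 rest =>
    have hc0 : c0 ≠ ' ' := by
      intro hc; apply h; rw [hts, hc]; rfl
    simp only [if_neg hc0]
    rw [pvFoldA rest [] 0, List.nil_append]
    have := pvDiffs rest 0 0 1 rfl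
    simp only [Nat.cast_zero] at this
    simp only [pvPositions, hc0, ne_eq, not_false_iff, if_pos, List.drop_one, List.tail_cons]
    exact this.symm

-- ===== VERDICT (by name: the statement is the Claim_ definition above) =====
theorem parse_intervals_spec : Claim_equal_parse_intervals := by
  intro s _ hpre
  unfold Spec_parse_intervals
  exact parse_intervals_eq s hpre
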